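-- pv_equiv track=rewrite | github.com/GamerBhai02/25CodeCrafters | model_run.py | match_fund
-- ===== SOURCE A (Python) =====
-- def match_fund(article_text, fund_holdings):
--     matches = []
--     for fund, holdings in fund_holdings.items():
--         for holding in holdings:
--             if holding.lower() in article_text.lower():
--                 matches.append(fund)
--                 break
--     return matches
-- ===== SOURCE B (Python) =====
-- def match_fund(article_text, fund_holdings):
--     art = article_text.lower()
--     # Stage 1: index every distinct lowered holding under its first character
--     # (empty holdings match everywhere, so they are matched outright).
--     index = {}
--     matched = set()
--     for holdings in fund_holdings.values():
--         for holding in holdings: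
--             p = holding.lower()
--             if p:
--                 index.setdefault(p[0], set()).add(p)
--             else:
--                 matched.add(p)
--     # Stage 2: one scan over the article; at each position only the patterns
--     # indexed under the current character are candidates, and a pattern that
--     # has matched is removed from its bucket so it is never tested again.
--     for i, c in enumerate(art):
--         bucket = index.get(c)
--         if bucket:
--             found = {p for p in bucket if art.startswith(p, i)}
--             if found:
--                 matched |= found
--                 index[c] = bucket - found
--     # Stage 3: a fund matches iff one of its holdings was matched by the scan.
--     return [fund for fund, holdings in fund_holdings.items()
--             if any(h.lower() in matched for h in holdings)]
-- ===== Notes on version B (the rewrite author's own statement) =====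
-- stated objective: alternative
-- what changed: B replaces A's per-holding substring searches (each re-lowering the article) by a staged multi-pattern matcher: it first builds a first-character index of all distinct lowered holdings, then makes a single scan over the lowered article testing at each position only the patterns indexed under the current character (removing a pattern from its bucket once it has matched), and finally emits funds whose holdings hit the matched set.
import Mathlib
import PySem

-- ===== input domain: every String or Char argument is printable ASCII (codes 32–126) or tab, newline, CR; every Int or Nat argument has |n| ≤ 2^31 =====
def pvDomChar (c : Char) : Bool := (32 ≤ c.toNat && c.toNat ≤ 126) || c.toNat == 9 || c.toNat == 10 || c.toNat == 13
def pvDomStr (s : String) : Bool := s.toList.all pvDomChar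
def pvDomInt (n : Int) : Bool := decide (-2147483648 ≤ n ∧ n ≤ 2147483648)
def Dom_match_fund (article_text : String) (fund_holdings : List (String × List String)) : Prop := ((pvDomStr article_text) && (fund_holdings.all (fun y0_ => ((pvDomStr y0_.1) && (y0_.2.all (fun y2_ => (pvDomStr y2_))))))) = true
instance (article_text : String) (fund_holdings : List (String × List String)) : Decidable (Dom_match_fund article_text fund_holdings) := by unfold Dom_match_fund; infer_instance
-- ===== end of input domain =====

-- B is a staged multi-pattern matcher: index distinct lowered holdings by first character,
-- one scan over the lowered article collecting the matched set, then emit funds whose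
-- holdings hit that set (objective: alternative).


-- ===== PORT A =====
-- inner 'for holding in holdings: … break' loop of A
def matchFundInner (article_text fund : String) (holdings acc : List String) : List String :=
  match holdings with
  | [] => acc
  | h :: t =>
    if PySem.Str.isIn (PySem.Str.lower h) (PySem.Str.lower article_text) then acc ++ [fund]
    else matchFundInner article_text fund t acc

def match_fund (article_text : String) (fund_holdings : List (String × List String)) : List String :=
  fund_holdings.foldl (fun acc p => matchFundInner article_text p.1 p.2 acc) []

-- ===== PORT B =====
-- stage 1 body: 'p = holding.lower(); if p: index.setdefault(p[0], set()).add(p) else: matched.add(p)'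
def altIndexStep (st : PySem.Dict Char (PySem.Set String) × PySem.Set String) (holding : String) :
    PySem.Dict Char (PySem.Set String) × PySem.Set String :=
  let p := PySem.Str.lower holding
  match p.toList with
  | [] => (st.1, PySem.Set.add st.2 p)
  | c :: _ => (PySem.Dict.modify st.1 c PySem.Set.empty (fun s => PySem.Set.add s p), st.2)

-- stage 2 body at one enumerate position (i, c): test the candidates indexed under c,
-- move the found ones into matched and drop them from their bucket;
-- 'art.startswith(p, i)' with 0 ≤ i < len(art) is exactly the prefix test on art[i:];
-- Python's 'if bucket:' skips both a missing key (None) and an empty bucket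
def altScanPos (art : List Char)
    (st : PySem.Dict Char (PySem.Set String) × PySem.Set String) (ic : Int × Char) :
    PySem.Dict Char (PySem.Set String) × PySem.Set String :=
  let bucket := PySem.Dict.getD st.1 ic.2 PySem.Set.empty
  if bucket = [] then st
  else
    -- set comprehension over the (duplicate-free) bucket: filter keeps it a set
    let found := bucket.filter (fun p => PySem.Chars.startswith (art.drop ic.1.toNat) p.toList)
    if found = [] then st
    else (PySem.Dict.insert st.1 ic.2 (PySem.Set.diff bucket found), PySem.Set.union st.2 found)

def match_fund_alt (article_text : String) (fund_holdings : List (String × List String)) : List String :=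
  let art := PySem.Str.lower article_text
  let st := fund_holdings.foldl (fun st pr => pr.2.foldl altIndexStep st)
      ((PySem.Dict.empty : PySem.Dict Char (PySem.Set String)), (PySem.Set.empty : PySem.Set String))
  let fin := (PySem.List.enumerate art.toList 0).foldl (fun st ic => altScanPos art.toList st ic) st
  (fund_holdings.filter
      (fun pr => pr.2.any (fun h => PySem.Set.contains fin.2 (PySem.Str.lower h)))).map (fun pr => pr.1)

-- ===== PRECONDITION & SPEC =====
def Spec_match_fund (article_text : String) (fund_holdings : List (String × List String)) (out : List String) : Prop := out = match_fund_alt article_text fund_holdings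
instance (article_text : String) (fund_holdings : List (String × List String)) (out : List String) : Decidable (Spec_match_fund article_text fund_holdings out) := by unfold Spec_match_fund; infer_instance

-- ===== CLAIM (what is proved, stated in full; the proofs are below) =====
def Claim_equal_match_fund : Prop := ∀ (article_text : String) (fund_holdings : List (String × List String)), Dom_match_fund article_text fund_holdings → Spec_match_fund article_text fund_holdings (match_fund article_text fund_holdings)

-- ===== LEMMAS AND PROOFS =====

-- proof-side names for B's intermediate stages
def stage1 (fund_holdings : List (String × List String)) :
    PySem.Dict Char (PySem.Set String) × PySem.Set String :=
  fund_holdings.foldl (fun st pr => pr.2.foldl altIndexStep st)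
    ((PySem.Dict.empty : PySem.Dict Char (PySem.Set String)), (PySem.Set.empty : PySem.Set String))

def matchedSet (article_text : String) (fund_holdings : List (String × List String)) : PySem.Set String :=
  ((PySem.List.enumerate (PySem.Str.lower article_text).toList 0).foldl
    (fun st ic => altScanPos (PySem.Str.lower article_text).toList st ic)
    (stage1 fund_holdings)).2

theorem match_fund_alt_eq (article_text : String) (fund_holdings : List (String × List String)) :
    match_fund_alt article_text fund_holdings
      = (fund_holdings.filter (fun pr => pr.2.any
          (fun h => PySem.Set.contains (matchedSet article_text fund_holdings) (PySem.Str.lower h)))).map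
          (fun pr => pr.1) := rfl

-- A's inner loop as an 'any' test
theorem matchFundInner_eq (article_text fund : String) :
    ∀ (hs acc : List String), matchFundInner article_text fund hs acc
      = if hs.any (fun h => PySem.Str.isIn (PySem.Str.lower h) (PySem.Str.lower article_text))
        then acc ++ [fund] else acc
  | [], acc => rfl
  | h :: t, acc => by
    simp only [matchFundInner, matchFundInner_eq article_text fund t acc, List.any_cons,
      Bool.or_eq_true]
    by_cases hc : PySem.Str.isIn (PySem.Str.lower h) (PySem.Str.lower article_text) = true
    · rw [if_pos hc, if_pos (Or.inl hc)]
    · rw [if_neg hc]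
      by_cases h2 : (t.any (fun h => PySem.Str.isIn (PySem.Str.lower h)
          (PySem.Str.lower article_text))) = true
      · rw [if_pos h2, if_pos (Or.inr h2)]
      · rw [if_neg h2, if_neg (by tauto)]

-- stage-1 inner fold: the matched accumulator collects exactly the empty lowered holdings
theorem mem_inner_matched : ∀ (hs : List String)
    (st : PySem.Dict Char (PySem.Set String) × PySem.Set String) (q : String),
    q ∈ (hs.foldl altIndexStep st).2
      ↔ q ∈ st.2 ∨ (q = "" ∧ ∃ h ∈ hs, PySem.Str.lower h = q)
  | [], st, q => by simp
  | h :: t, st, q => by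
    rw [List.foldl_cons, mem_inner_matched t _ q]
    cases hp : (PySem.Str.lower h).toList with
    | nil =>
      have hempty : PySem.Str.lower h = "" := String.toList_eq_nil_iff.mp hp
      have hstep : altIndexStep st h = (st.1, PySem.Set.add st.2 (PySem.Str.lower h)) := by
        simp only [altIndexStep, hp]
      rw [hstep]
      simp only [PySem.Set.mem_add, hempty]
      constructor
      · rintro ((hq | hq) | hq)
        · exact Or.inl hq
        · exact Or.inr ⟨hq, h, by simp, hempty.trans hq.symm⟩
        · exact Or.inr ⟨hq.1, hq.2.imp (fun x hx => ⟨List.mem_cons_of_mem _ hx.1, hx.2⟩)⟩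
      · rintro (hq | ⟨rfl, x, hx, hlx⟩)
        · exact Or.inl (Or.inl hq)
        · rcases List.mem_cons.mp hx with rfl | hx
          · exact Or.inl (Or.inr rfl)
          · exact Or.inr ⟨rfl, x, hx, hlx⟩
    | cons c rest =>
      have hstep : altIndexStep st h
          = (PySem.Dict.modify st.1 c PySem.Set.empty
              (fun s => PySem.Set.add s (PySem.Str.lower h)), st.2) := by
        simp only [altIndexStep, hp]
      rw [hstep]
      constructor
      · rintro (hq | hq)
        · exact Or.inl hq
        · exact Or.inr ⟨hq.1, hq.2.imp (fun x hx => ⟨List.mem_cons_of_mem _ hx.1, hx.2⟩)⟩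
      · rintro (hq | ⟨rfl, x, hx, hlx⟩)
        · exact Or.inl hq
        · rcases List.mem_cons.mp hx with rfl | hx
          · exact absurd hp (by rw [hlx]; simp)
          · exact Or.inr ⟨rfl, x, hx, hlx⟩

-- stage-1 inner fold: a bucket collects exactly the lowered holdings whose first char is the key
theorem mem_inner_idx : ∀ (hs : List String)
    (st : PySem.Dict Char (PySem.Set String) × PySem.Set String) (c : Char) (q : String),
    q ∈ PySem.Dict.getD (hs.foldl altIndexStep st).1 c PySem.Set.empty
      ↔ q ∈ PySem.Dict.getD st.1 c PySem.Set.empty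
        ∨ (q.toList.head? = some c ∧ ∃ h ∈ hs, PySem.Str.lower h = q)
  | [], st, c, q => by simp
  | h :: t, st, c, q => by
    rw [List.foldl_cons, mem_inner_idx t _ c q]
    cases hp : (PySem.Str.lower h).toList with
    | nil =>
      have hstep : altIndexStep st h = (st.1, PySem.Set.add st.2 (PySem.Str.lower h)) := by
        simp only [altIndexStep, hp]
      rw [hstep]
      constructor
      · rintro (hq | hq)
        · exact Or.inl hq
        · exact Or.inr ⟨hq.1, hq.2.imp (fun x hx => ⟨List.mem_cons_of_mem _ hx.1, hx.2⟩)⟩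
      · rintro (hq | ⟨hhead, x, hx, hlx⟩)
        · exact Or.inl hq
        · rcases List.mem_cons.mp hx with rfl | hx
          · rw [← hlx, hp] at hhead; simp at hhead
          · exact Or.inr ⟨hhead, x, hx, hlx⟩
    | cons c0 rest =>
      have hstep : altIndexStep st h
          = (PySem.Dict.modify st.1 c0 PySem.Set.empty
              (fun s => PySem.Set.add s (PySem.Str.lower h)), st.2) := by
        simp only [altIndexStep, hp]
      rw [hstep]
      simp only [PySem.Dict.getD_modify]
      by_cases hcc : c = c0
      · subst hcc
        rw [if_pos rfl, PySem.Set.mem_add]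
        constructor
        · rintro ((hq | hq) | hq)
          · exact Or.inl hq
          · exact Or.inr ⟨by rw [hq, hp]; rfl, h, by simp, hq.symm⟩
          · exact Or.inr ⟨hq.1, hq.2.imp (fun x hx => ⟨List.mem_cons_of_mem _ hx.1, hx.2⟩)⟩
        · rintro (hq | ⟨hhead, x, hx, hlx⟩)
          · exact Or.inl (Or.inl hq)
          · rcases List.mem_cons.mp hx with rfl | hx
            · exact Or.inl (Or.inr hlx.symm)
            · exact Or.inr ⟨hhead, x, hx, hlx⟩
      · simp only [if_neg hcc]
        constructor
        · rintro (hq | hq)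
          · exact Or.inl hq
          · exact Or.inr ⟨hq.1, hq.2.imp (fun x hx => ⟨List.mem_cons_of_mem _ hx.1, hx.2⟩)⟩
        · rintro (hq | ⟨hhead, x, hx, hlx⟩)
          · exact Or.inl hq
          · rcases List.mem_cons.mp hx with rfl | hx
            · rw [← hlx, hp] at hhead
              simp only [List.head?_cons, Option.some.injEq] at hhead
              exact absurd hhead.symm hcc
            · exact Or.inr ⟨hhead, x, hx, hlx⟩

theorem mem_stage1_matched (fund_holdings : List (String × List String)) (q : String) :
    q ∈ (stage1 fund_holdings).2
      ↔ q = "" ∧ ∃ pr ∈ fund_holdings, ∃ h ∈ pr.2, PySem.Str.lower h = q := by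
  unfold stage1
  suffices H : ∀ (l : List (String × List String))
      (st : PySem.Dict Char (PySem.Set String) × PySem.Set String),
      q ∈ (l.foldl (fun st pr => pr.2.foldl altIndexStep st) st).2
        ↔ q ∈ st.2 ∨ (q = "" ∧ ∃ pr ∈ l, ∃ h ∈ pr.2, PySem.Str.lower h = q) by
    rw [H]; simp [PySem.Set.empty]
  intro l
  induction l with
  | nil => simp
  | cons pr t ih =>
    intro st
    rw [List.foldl_cons, ih, mem_inner_matched]
    constructor
    · rintro ((hq | hq) | hq)
      · exact Or.inl hq
      · exact Or.inr ⟨hq.1, pr, by simp, hq.2⟩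
      · exact Or.inr ⟨hq.1, hq.2.imp (fun x hx => ⟨List.mem_cons_of_mem _ hx.1, hx.2⟩)⟩
    · rintro (hq | ⟨rfl, x, hx, hh⟩)
      · exact Or.inl (Or.inl hq)
      · rcases List.mem_cons.mp hx with rfl | hx
        · exact Or.inl (Or.inr ⟨rfl, hh⟩)
        · exact Or.inr ⟨rfl, x, hx, hh⟩

theorem mem_stage1_idx (fund_holdings : List (String × List String)) (c : Char) (q : String) :
    q ∈ PySem.Dict.getD (stage1 fund_holdings).1 c PySem.Set.empty
      ↔ q.toList.head? = some c ∧ ∃ pr ∈ fund_holdings, ∃ h ∈ pr.2, PySem.Str.lower h = q := by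
  unfold stage1
  suffices H : ∀ (l : List (String × List String))
      (st : PySem.Dict Char (PySem.Set String) × PySem.Set String),
      q ∈ PySem.Dict.getD (l.foldl (fun st pr => pr.2.foldl altIndexStep st) st).1 c PySem.Set.empty
        ↔ q ∈ PySem.Dict.getD st.1 c PySem.Set.empty
          ∨ (q.toList.head? = some c ∧ ∃ pr ∈ l, ∃ h ∈ pr.2, PySem.Str.lower h = q) by
    rw [H]
    simp [PySem.Dict.getD, PySem.Dict.get?, PySem.Dict.empty, PySem.Set.empty]
  intro l
  induction l with
  | nil => simp
  | cons pr t ih =>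
    intro st
    rw [List.foldl_cons, ih, mem_inner_idx]
    constructor
    · rintro ((hq | hq) | hq)
      · exact Or.inl hq
      · exact Or.inr ⟨hq.1, pr, by simp, hq.2⟩
      · exact Or.inr ⟨hq.1, hq.2.imp (fun x hx => ⟨List.mem_cons_of_mem _ hx.1, hx.2⟩)⟩
    · rintro (hq | ⟨hhead, x, hx, hh⟩)
      · exact Or.inl (Or.inl hq)
      · rcases List.mem_cons.mp hx with rfl | hx
        · exact Or.inl (Or.inr ⟨hhead, hh⟩)
        · exact Or.inr ⟨hhead, x, hx, hh⟩

-- membership in the matched set after the article scan: a pattern is matched iff it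
-- already was, or some position's bucket holds it and it starts there (bucket removal
-- only ever moves already-matched patterns out of play)
theorem mem_scan (art : List Char) :
    ∀ (l : List (Int × Char)) (st : PySem.Dict Char (PySem.Set String) × PySem.Set String) (q : String),
      q ∈ (l.foldl (fun st ic => altScanPos art st ic) st).2
      ↔ q ∈ st.2 ∨ ∃ ic ∈ l, q ∈ PySem.Dict.getD st.1 ic.2 PySem.Set.empty
          ∧ PySem.Chars.startswith (art.drop ic.1.toNat) q.toList = true
  | [], st, q => by simp
  | ic :: t, st, q => by
    rw [List.foldl_cons, mem_scan art t _ q]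
    unfold altScanPos
    by_cases hb : PySem.Dict.getD st.1 ic.2 PySem.Set.empty = []
    · rw [if_pos hb]
      constructor
      · rintro (hq | hq)
        · exact Or.inl hq
        · exact Or.inr (hq.imp (fun x hx => ⟨List.mem_cons_of_mem _ hx.1, hx.2⟩))
      · rintro (hq | ⟨x, hx, hq1, hq2⟩)
        · exact Or.inl hq
        · rcases List.mem_cons.mp hx with rfl | hx
          · rw [hb] at hq1; cases hq1
          · exact Or.inr ⟨x, hx, hq1, hq2⟩
    · rw [if_neg hb]
      simp only
      by_cases hf : (PySem.Dict.getD st.1 ic.2 PySem.Set.empty).filter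
          (fun p => PySem.Chars.startswith (art.drop ic.1.toNat) p.toList) = []
      · rw [if_pos hf]
        constructor
        · rintro (hq | hq)
          · exact Or.inl hq
          · exact Or.inr (hq.imp (fun x hx => ⟨List.mem_cons_of_mem _ hx.1, hx.2⟩))
        · rintro (hq | ⟨x, hx, hq1, hq2⟩)
          · exact Or.inl hq
          · rcases List.mem_cons.mp hx with rfl | hx
            · exact absurd (List.mem_filter.mpr ⟨hq1, hq2⟩) (by rw [hf]; exact List.not_mem_nil)
            · exact Or.inr ⟨x, hx, hq1, hq2⟩
      · rw [if_neg hf]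
        constructor
        · rintro (hq | ⟨x, hx, hq1, hq2⟩)
          · rcases (PySem.Set.mem_union ..).mp hq with hq | hq
            · exact Or.inl hq
            · rcases List.mem_filter.mp hq with ⟨hq1, hq2⟩
              exact Or.inr ⟨ic, by simp, hq1, hq2⟩
          · by_cases hcc : x.2 = ic.2
            · rw [hcc, PySem.Dict.getD_insert_self] at hq1
              rcases (PySem.Set.mem_diff ..).mp hq1 with ⟨hq1, _⟩
              exact Or.inr ⟨x, List.mem_cons_of_mem _ hx, by rw [hcc]; exact hq1, hq2⟩
            · rw [PySem.Dict.getD_insert_of_ne _ _ _ hcc] at hq1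
              exact Or.inr ⟨x, List.mem_cons_of_mem _ hx, hq1, hq2⟩
        · rintro (hq | ⟨x, hx, hq1, hq2⟩)
          · exact Or.inl ((PySem.Set.mem_union ..).mpr (Or.inl hq))
          · rcases List.mem_cons.mp hx with rfl | hx
            · exact Or.inl ((PySem.Set.mem_union ..).mpr
                (Or.inr (List.mem_filter.mpr ⟨hq1, hq2⟩)))
            · by_cases hqf : q ∈ (PySem.Dict.getD st.1 ic.2 PySem.Set.empty).filter
                  (fun p => PySem.Chars.startswith (art.drop ic.1.toNat) p.toList)
              · exact Or.inl ((PySem.Set.mem_union ..).mpr (Or.inr hqf))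
              · refine Or.inr ⟨x, hx, ?_, hq2⟩
                by_cases hcc : x.2 = ic.2
                · rw [hcc, PySem.Dict.getD_insert_self]
                  exact (PySem.Set.mem_diff ..).mpr ⟨by rw [hcc] at hq1; exact hq1, hqf⟩
                · rw [PySem.Dict.getD_insert_of_ne _ _ _ hcc]
                  exact hq1

-- the heart: for a lowered holding of the input, scan membership = Python substring test
theorem mem_matchedSet (article_text : String) (fund_holdings : List (String × List String))
    (pr : String × List String) (h : String) (hpr : pr ∈ fund_holdings) (hh : h ∈ pr.2) :
    PySem.Str.lower h ∈ matchedSet article_text fund_holdings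
      ↔ PySem.Str.isIn (PySem.Str.lower h) (PySem.Str.lower article_text) = true := by
  set p := PySem.Str.lower h with hp
  set artL := (PySem.Str.lower article_text).toList with hart
  rw [matchedSet, mem_scan, mem_stage1_matched]
  rw [show PySem.Str.isIn p (PySem.Str.lower article_text)
        = PySem.Chars.isIn p.toList artL from PySem.Str.isIn_eq ..]
  rw [← PySem.Chars.exists_prefix_drop_iff_isIn]
  cases hptl : p.toList with
  | nil =>
    have hpe : p = "" := String.toList_eq_nil_iff.mp hptl
    constructor
    · intro _; exact ⟨0, by simp⟩
    · intro _; exact Or.inl ⟨hpe, pr, hpr, h, hh, hp.symm⟩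
  | cons c rest =>
    have hpne : p ≠ "" := by intro hq; rw [hq] at hptl; simp at hptl
    constructor
    · rintro (⟨hq, _⟩ | ⟨ic, hic, hbucket, hsw⟩)
      · exact absurd hq hpne
      · exact ⟨ic.1.toNat, (PySem.Chars.startswith_iff ..).mp hsw⟩
    · rintro ⟨j, hpre⟩
      refine Or.inr ?_
      have hjlt : j < artL.length := by
        by_contra hge
        rw [List.drop_eq_nil_of_le (Nat.le_of_not_lt hge)] at hpre
        rw [List.prefix_nil] at hpre
        exact List.cons_ne_nil _ _ hpre
      have hhead : artL[j] = c := by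
        have h1 : (artL.drop j).head? = some c := by
          rcases hpre with ⟨u, hu⟩
          rw [← hu]; rfl
        rw [List.head?_drop] at h1
        have h2 : artL[j]? = some artL[j] := List.getElem?_eq_getElem hjlt
        rw [h2] at h1
        exact Option.some_injective _ h1
      refine ⟨((j : Int), artL[j]), ?_, ?_, ?_⟩
      · rw [PySem.List.mem_enumerate_iff]
        exact ⟨j, by simpa [hart] using hjlt, by simp [hart]⟩
      · rw [mem_stage1_idx]
        exact ⟨by simp [hptl, hhead], pr, hpr, h, hh, hp.symm⟩
      · rw [PySem.Chars.startswith_iff]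
        simpa [hart] using hpre

-- ===== VERDICT (by name: the statement is the Claim_ definition above) =====
theorem match_fund_spec : Claim_equal_match_fund := by
  intro article_text fund_holdings _
  unfold Spec_match_fund
  rw [match_fund_alt_eq]
  unfold match_fund
  have hfun : (fun (acc : List String) (p : String × List String) =>
      matchFundInner article_text p.1 p.2 acc)
      = (fun acc p => if p.2.any (fun h => PySem.Str.isIn (PySem.Str.lower h)
          (PySem.Str.lower article_text)) then acc ++ [p.1] else acc) := by
    funext acc p
    exact matchFundInner_eq article_text p.1 p.2 acc
  rw [hfun, PySem.List.foldl_append_if]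
  rw [List.nil_append]
  congr 1
  apply List.filter_congr
  intro pr hpr
  apply PySem.List.any_congr_mem
  intro h hh
  have := mem_matchedSet article_text fund_holdings pr h hpr hh
  by_cases hm : PySem.Str.lower h ∈ matchedSet article_text fund_holdings
  · rw [this.mp hm]
    simp [PySem.Set.contains, hm]
  · have : PySem.Str.isIn (PySem.Str.lower h) (PySem.Str.lower article_text) = false := by
      rw [← Bool.not_eq_true]; exact fun hx => hm (this.mpr hx)
    rw [this]
    simp [PySem.Set.contains, hm]
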